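-- pv_equiv track=rewrite | github.com/JuniorCorzo/Python | Exercise_codewars/human_time.py | redable_time
-- ===== SOURCE A (Python) =====
-- def redable_time(seconds):
--     hh = 00
--     mm = 00
--     ss = 00
--     for i in range(seconds):
--         ss += 1
--         if ss == 60:
--             mm +=1
--             ss = 0
--         if mm == 60:
--             hh += 1
--             mm = 0
--
--     result = "{:02}:{:02}:{:02}".format(hh, mm, ss)
--     return result
-- ===== SOURCE B (Python) =====
-- def redable_time(seconds):
--     s = max(seconds, 0)
--     hh = s // 3600
--     mm = s % 3600 // 60
--     ss = s % 60
--     return f"{hh:02}:{mm:02}:{ss:02}"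
-- ===== Notes on version B (the rewrite author's own statement) =====
-- stated objective: faster
-- what changed: Replaces the one-tick-per-second counting loop by closed-form integer division/modulo (hh=s//3600, mm=s%3600//60, ss=s%60), treating negative inputs like the empty loop does.
import Mathlib
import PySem

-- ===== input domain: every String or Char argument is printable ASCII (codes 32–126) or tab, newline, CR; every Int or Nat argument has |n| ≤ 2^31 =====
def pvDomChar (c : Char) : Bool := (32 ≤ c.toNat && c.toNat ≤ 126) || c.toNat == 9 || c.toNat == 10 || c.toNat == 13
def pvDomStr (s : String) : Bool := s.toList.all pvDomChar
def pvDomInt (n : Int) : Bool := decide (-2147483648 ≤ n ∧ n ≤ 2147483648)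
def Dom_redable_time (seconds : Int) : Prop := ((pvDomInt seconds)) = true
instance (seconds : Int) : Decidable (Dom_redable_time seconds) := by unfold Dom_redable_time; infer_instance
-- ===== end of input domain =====

-- B replaces A's one-tick-per-second counting loop by closed-form division/modulo (O(1) instead of O(seconds)).

-- ===== PORT A =====
-- "{:02}".format(n) for the values A formats (always ≥ 0): left-pad str(n) with '0' to width 2
def pvPad2 (n : Int) : String := PySem.Str.zfill (PySem.Int.toStr n) 2

-- loop body of A: ss += 1; if ss == 60: mm += 1; ss = 0; if mm == 60: hh += 1; mm = 0
def pvStepA (st : Int × Int × Int) : Int × Int × Int :=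
  let hh := st.1
  let mm := st.2.1
  let ss := st.2.2 + 1
  let p1 : Int × Int := if ss = 60 then (mm + 1, 0) else (mm, ss)
  let p2 : Int × Int := if p1.1 = 60 then (hh + 1, 0) else (hh, p1.1)
  (p2.1, p2.2, p1.2)

def redable_time (seconds : Int) : String :=
  let st := (PySem.List.pyRange 0 seconds 1).foldl (fun s _ => pvStepA s) (0, 0, 0)
  pvPad2 st.1 ++ ":" ++ pvPad2 st.2.1 ++ ":" ++ pvPad2 st.2.2

-- ===== PORT B =====
def redable_time_alt (seconds : Int) : String :=
  let s := max seconds 0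
  let hh := PySem.Int.floordiv s 3600
  let mm := PySem.Int.floordiv (PySem.Int.mod s 3600) 60
  let ss := PySem.Int.mod s 60
  pvPad2 hh ++ ":" ++ pvPad2 mm ++ ":" ++ pvPad2 ss

-- ===== PRECONDITION & SPEC =====
def Spec_redable_time (seconds : Int) (out : String) : Prop := out = redable_time_alt seconds
instance (seconds : Int) (out : String) : Decidable (Spec_redable_time seconds out) := by unfold Spec_redable_time; infer_instance

-- ===== CLAIM (what is proved, stated in full; the proofs are below) =====
def Claim_equal_redable_time : Prop := ∀ (seconds : Int), Dom_redable_time seconds → Spec_redable_time seconds (redable_time seconds)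

-- ===== LEMMAS AND PROOFS =====

-- loop invariant: after n iterations the state is (n/3600, n%3600/60, n%60)
theorem pvLoopInv (n : Nat) :
    (PySem.List.pyRange 0 (n : Int) 1).foldl (fun s _ => pvStepA s) (0, 0, 0)
      = (((n / 3600 : Nat) : Int), ((n % 3600 / 60 : Nat) : Int), ((n % 60 : Nat) : Int)) := by
  induction n with
  | zero => simp
  | succ n ih =>
      have h : PySem.List.pyRange 0 ((n : Int) + 1) 1
          = PySem.List.pyRange 0 (n : Int) 1 ++ [(n : Int)] :=
        PySem.List.pyRange_one_succ_right (by exact_mod_cast Nat.zero_le n)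
      push_cast
      rw [h, List.foldl_append, ih]
      simp only [List.foldl, pvStepA]
      split_ifs with h1 h2 h3 <;>
        refine Prod.ext ?_ (Prod.ext ?_ ?_) <;> simp_all <;> omega

theorem pvA_eq_alt_nonneg (n : Nat) : redable_time (n : Int) = redable_time_alt (n : Int) := by
  unfold redable_time redable_time_alt
  rw [pvLoopInv n]
  have hmax : max ((n : Int)) 0 = (n : Int) := by omega
  rw [hmax]
  simp

theorem pvA_eq_alt_neg (m : Int) (hm : m < 0) : redable_time m = redable_time_alt m := by
  unfold redable_time redable_time_alt
  rw [PySem.List.pyRange_one_eq_nil (by omega)]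
  have hmax : max m 0 = (0 : Int) := by omega
  rw [hmax]
  simp [PySem.Int.floordiv, PySem.Int.mod]

-- ===== VERDICT (by name: the statement is the Claim_ definition above) =====
theorem redable_time_spec : Claim_equal_redable_time := by
  intro seconds _
  unfold Spec_redable_time
  rcases Int.lt_or_le seconds 0 with h | h
  · exact pvA_eq_alt_neg seconds h
  · obtain ⟨n, rfl⟩ := Int.eq_ofNat_of_zero_le h
    exact pvA_eq_alt_nonneg n
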